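-- pv_equiv track=rewrite | github.com/celinehocquette/magicpopper | ilp-experiments/ilpexp/problem/list_magicvalues_multipleclauses/list.py | generate_constant_set
-- ===== SOURCE A (Python) =====
-- import itertools
--
-- def generate_constant_set(n_constants):
--
--     chr_set = [chr(i) for i in range(97, 123)]
--
--     length = 1
--     constant_set = []
--     while n_constants > 0:
--         new_c = ["".join(x) for x in list(itertools.product(chr_set, repeat=length)) if
--                  "".join(x) != "magic_val" and "".join(x) != "nl" and "".join(x) != "fp"]
--         constant_set += new_c[:min(n_constants, len(new_c))]
--         n_constants -= len(new_c)
--         length += 1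
--
--     return constant_set
-- ===== SOURCE B (Python) =====
-- def _inc(digits):
--     # base-26 counter, least-significant digit first; increment by one,
--     # growing a new digit when all positions carry out.
--     if not digits:
--         return [0]
--     if digits[0] == 25:
--         return [0] + _inc(digits[1:])
--     return [digits[0] + 1] + digits[1:]
--
--
-- def generate_constant_set(n_constants):
--     reserved = {"magic_val", "nl", "fp"}
--     result = []
--     digits = []  # odometer state: base-26 digits, least significant first
--     while len(result) < n_constants:
--         digits = _inc(digits)
--         word = "".join(chr(97 + d) for d in reversed(digits))
--         if word not in reserved:
--             result.append(word)
--     return result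
-- ===== Notes on version B (the rewrite author's own statement) =====
-- stated objective: alternative
-- what changed: Replaces the per-length itertools.product materialisation (which builds every word of each length and then slices) with a single base-26 odometer loop that increments a digit counter and emits one word at a time, skipping the three reserved words, so no whole length block is ever materialised.
import Mathlib
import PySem

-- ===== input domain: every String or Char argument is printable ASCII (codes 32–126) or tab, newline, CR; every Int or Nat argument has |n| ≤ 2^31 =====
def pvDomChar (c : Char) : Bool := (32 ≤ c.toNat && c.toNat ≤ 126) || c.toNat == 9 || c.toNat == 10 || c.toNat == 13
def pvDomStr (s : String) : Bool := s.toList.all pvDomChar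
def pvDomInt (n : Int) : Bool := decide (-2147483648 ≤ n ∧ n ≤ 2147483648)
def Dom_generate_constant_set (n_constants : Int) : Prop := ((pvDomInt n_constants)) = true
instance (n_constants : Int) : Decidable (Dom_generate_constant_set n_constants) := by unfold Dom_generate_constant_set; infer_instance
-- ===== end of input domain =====

-- B replaces A's per-length itertools.product materialisation by a single base-26
-- odometer loop that emits one word at a time (objective: alternative — a different
-- algorithm of similar measured cost; no whole length block is materialised).

-- ===== PORT A =====
-- chr_set = [chr(i) for i in range(97, 123)]
def pvChrSet : List Char := (PySem.List.pyRange 97 123 1).map (fun i => Char.ofNat i.toNat)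

-- itertools.product(chr_set, repeat=length): tuples of 1-char strings, ported as
-- lists of chars ("".join of such a tuple is then String.ofList; exact on this ASCII alphabet)
def pvProd : Nat → List (List Char)
  | 0 => [[]]
  | k + 1 => pvChrSet.flatMap (fun c => (pvProd k).map (fun x => c :: x))

-- the comprehension's condition: "".join(x) != "magic_val" and != "nl" and != "fp"
def pvGood (s : String) : Bool := s != "magic_val" && s != "nl" && s != "fp"

-- the while loop; fuel only makes the recursion total (never exhausted for the fuel
-- passed below, since every iteration shrinks n by len(new_c) ≥ 1)
def pvLoopA (fuel : Nat) (n : Int) (length : Nat) (acc : List String) : List String :=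
  if n ≤ 0 then acc
  else
    match fuel with
    | 0 => acc
    | f + 1 =>
      let new_c := ((pvProd length).map (fun x => String.ofList x)).filter pvGood
      pvLoopA f (n - new_c.length) (length + 1)
        (acc ++ PySem.List.slice new_c none (some (min n (new_c.length : Int))))

def generate_constant_set (n_constants : Int) : List String :=
  pvLoopA n_constants.toNat n_constants 1 []

-- ===== PORT B =====
def pvReserved : PySem.Set String := PySem.Set.ofList ["magic_val", "nl", "fp"]

-- _inc(digits): base-26 counter, least-significant digit first
def pvIncB : List Int → List Int
  | [] => [0]
  | d :: rest => if d == 25 then 0 :: pvIncB rest else (d + 1) :: rest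

-- chr(97 + d)
def pvCh (d : Int) : Char := Char.ofNat (97 + d).toNat

-- the while loop of B; fuel n.toNat + 3 covers all iterations (at most 3 skips)
def pvLoopB (fuel : Nat) (n : Int) (digits : List Int) (acc : List String) : List String :=
  if (acc.length : Int) < n then
    match fuel with
    | 0 => acc
    | f + 1 =>
      let digits' := pvIncB digits
      let word := String.ofList (digits'.reverse.map pvCh)
      if PySem.Set.contains pvReserved word then pvLoopB f n digits' acc
      else pvLoopB f n digits' (acc ++ [word])
  else acc

def generate_constant_set_alt (n_constants : Int) : List String :=
  pvLoopB (n_constants.toNat + 3) n_constants [] []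

-- ===== PRECONDITION & SPEC =====
def Spec_generate_constant_set (n_constants : Int) (out : List String) : Prop := out = generate_constant_set_alt n_constants
instance (n_constants : Int) (out : List String) : Decidable (Spec_generate_constant_set n_constants out) := by unfold Spec_generate_constant_set; infer_instance

-- ===== CLAIM (what is proved, stated in full; the proofs are below) =====
def Claim_equal_generate_constant_set : Prop := ∀ (n_constants : Int), Dom_generate_constant_set n_constants → Spec_generate_constant_set n_constants (generate_constant_set n_constants)

-- ===== LEMMAS AND PROOFS =====

-- digit alphabet 0..25 (as Python ints)
def pvDigits : List Int := (List.range 26).map (fun k => (k : Int))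

-- all length-ℓ digit words, most-significant digit first, in product order
def pvWd : Nat → List (List Int)
  | 0 => [[]]
  | k + 1 => pvDigits.flatMap (fun d => (pvWd k).map (fun w => d :: w))

-- the k successive odometer states starting AT s
def pvSeq (s : List Int) : Nat → List (List Int)
  | 0 => []
  | k + 1 => s :: pvSeq (pvIncB s) k

-- the words of lengths ℓ, ℓ+1, …, ℓ+k-1 as odometer states (lsb-first)
def pvCatS (ℓ : Nat) : Nat → List (List Int)
  | 0 => []
  | k + 1 => (pvWd ℓ).map (fun w => w.reverse) ++ pvCatS (ℓ + 1) k

-- the same words, rendered as strings (A's blocks)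
def pvCatStr (ℓ : Nat) : Nat → List String
  | 0 => []
  | k + 1 => (pvWd ℓ).map (fun w => String.ofList (w.map pvCh)) ++ pvCatStr (ℓ + 1) k

def pvRender (st : List Int) : String := String.ofList (st.reverse.map pvCh)

theorem pvProd_eq_Wd (ℓ : Nat) : pvProd ℓ = (pvWd ℓ).map (fun w => w.map pvCh) := by
  induction ℓ with
  | zero => simp [pvProd, pvWd]
  | succ k ih =>
    simp only [pvProd, pvWd]
    rw [show pvChrSet = pvDigits.map pvCh from by decide]
    simp only [ih, List.flatMap_map, List.map_flatMap, List.map_map]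
    refine List.flatMap_congr ?_
    intro d _
    simp [Function.comp]


theorem pvLen_Wd (ℓ : Nat) : (pvWd ℓ).length = 26 ^ ℓ := by
  induction ℓ with
  | zero => simp [pvWd]
  | succ k ih =>
    simp only [pvWd, List.length_flatMap]
    simp only [List.length_map, ih]
    rw [List.map_const', List.sum_replicate, smul_eq_mul,
      show pvDigits.length = 26 from by decide]
    ring




theorem pvSeq_add (s : List Int) (a b : Nat) :
    pvSeq s (a + b) = pvSeq s a ++ pvSeq (pvIncB^[a] s) b := by
  induction a generalizing s with
  | zero => simp [pvSeq]
  | succ a ih =>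
    simp only [Nat.succ_add, pvSeq, ih (pvIncB s), List.cons_append]
    rw [Function.iterate_succ_apply]


theorem pvSeq_length (s : List Int) (k : Nat) : (pvSeq s k).length = k := by
  induction k generalizing s with
  | zero => rfl
  | succ k ih => simp [pvSeq, ih]


theorem pvSeq_take (s : List Int) (k k' : Nat) (h : k' ≤ k) :
    pvSeq s k' = (pvSeq s k).take k' := by
  obtain ⟨d, rfl⟩ := Nat.exists_eq_add_of_le h
  rw [pvSeq_add, List.take_append, pvSeq_length, List.take_of_length_le (by simp [pvSeq_length]),
    Nat.sub_self, List.take_zero, List.append_nil]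


theorem pvBlockInner (ℓ : Nat)
    (IH : ∀ t : List Int,
      pvSeq (List.replicate ℓ 0 ++ t) (26 ^ ℓ) = (pvWd ℓ).map (fun w => w.reverse ++ t) ∧
        pvIncB^[26 ^ ℓ] (List.replicate ℓ 0 ++ t) = List.replicate ℓ 0 ++ pvIncB t) :
    ∀ c t, c + 1 ≤ 26 →
      pvSeq (List.replicate ℓ 0 ++ (((26 - (c + 1) : Nat) : Int) :: t)) (26 ^ ℓ * (c + 1)) =
        ((List.range' (26 - (c + 1)) (c + 1)).map (fun k => (k : Int))).flatMap
          (fun d => (pvWd ℓ).map (fun w => w.reverse ++ d :: t)) ∧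
      pvIncB^[26 ^ ℓ * (c + 1)] (List.replicate ℓ 0 ++ (((26 - (c + 1) : Nat) : Int) :: t)) =
        List.replicate ℓ 0 ++ (0 :: pvIncB t) := by
  intro c
  induction c with
  | zero =>
    intro t _
    have h1 := (IH ((25 : Int) :: t)).1
    have h2 := (IH ((25 : Int) :: t)).2
    have h25 : pvIncB ((25 : Int) :: t) = 0 :: pvIncB t := by simp [pvIncB]
    constructor
    · simpa using h1
    · simpa [h25] using h2
  | succ c ihc =>
    intro t hc
    have hd : ((26 - (c + 1 + 1) : Nat) : Int) + 1 = ((26 - (c + 1) : Nat) : Int) := by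
      omega
    have hne : (((26 - (c + 1 + 1) : Nat) : Int) == 25) = false := by
      simp only [beq_eq_false_iff_ne, ne_eq]
      omega
    have hsplit : 26 ^ ℓ * (c + 1 + 1) = 26 ^ ℓ + 26 ^ ℓ * (c + 1) := by ring
    have hinc : pvIncB (((26 - (c + 1 + 1) : Nat) : Int) :: t) = ((26 - (c + 1) : Nat) : Int) :: t := by
      simp only [pvIncB, beq_iff_eq]
      rw [if_neg (by omega : ¬ (((26 - (c + 1 + 1) : Nat) : Int) = 25)), hd]
    have h2 := (IH (((26 - (c + 1 + 1) : Nat) : Int) :: t)).2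
    rw [hinc] at h2
    have ihc' := ihc t (by omega)
    constructor
    · rw [hsplit, pvSeq_add, (IH _).1, h2, ihc'.1,
        show List.range' (26 - (c + 1 + 1)) (c + 1 + 1) =
          (26 - (c + 1 + 1)) :: List.range' (26 - (c + 1)) (c + 1) from by
            have h : 26 - (c + 1) = 26 - (c + 1 + 1) + 1 := by omega
            rw [h, List.range'_succ]]
      simp [List.flatMap_cons]
    · rw [hsplit, Nat.add_comm (26 ^ ℓ), Function.iterate_add_apply, h2, ihc'.2]

theorem pvBlock (ℓ : Nat) (t : List Int) :
    pvSeq (List.replicate ℓ 0 ++ t) (26 ^ ℓ) = (pvWd ℓ).map (fun w => w.reverse ++ t) ∧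
      pvIncB^[26 ^ ℓ] (List.replicate ℓ 0 ++ t) = List.replicate ℓ 0 ++ pvIncB t := by
  induction ℓ generalizing t with
  | zero =>
    constructor
    · simp [pvSeq, pvWd]
    · simp
  | succ ℓ ih =>
    have key := pvBlockInner ℓ (fun t => ih t) 25 t (by omega)
    norm_num at key
    have hst : List.replicate (ℓ + 1) (0 : Int) ++ t = List.replicate ℓ 0 ++ ((0 : Int) :: t) := by
      rw [List.replicate_succ', List.append_assoc, List.singleton_append]
    have hpow : 26 ^ (ℓ + 1) = 26 ^ ℓ * 26 := by ring
    constructor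
    · rw [hst, hpow, key.1,
        show pvWd (ℓ + 1) = pvDigits.flatMap (fun d => (pvWd ℓ).map (fun w => d :: w)) from rfl,
        List.map_flatMap,
        show pvDigits = (List.range' 0 26).flatMap (fun a => [(a : Int)]) from by decide]
      refine List.flatMap_congr ?_
      intro d _
      simp [List.map_map, Function.comp, List.append_assoc]
    · rw [hst, hpow, key.2, ← List.singleton_append, ← List.append_assoc, ← List.replicate_succ']


theorem pvChain (k ℓ : Nat) :
    pvSeq (List.replicate ℓ 0) (pvCatS ℓ k).length = pvCatS ℓ k ∧
      pvIncB^[(pvCatS ℓ k).length] (List.replicate ℓ 0) = List.replicate (ℓ + k) 0 := by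
  induction k generalizing ℓ with
  | zero => simp [pvCatS, pvSeq]
  | succ k ih =>
    have hb := pvBlock ℓ []
    rw [List.append_nil] at hb
    have hb1 : pvSeq (List.replicate ℓ 0) (26 ^ ℓ) = (pvWd ℓ).map (fun w => w.reverse) := by
      rw [hb.1]
      simp
    have hb2 : pvIncB^[26 ^ ℓ] (List.replicate ℓ 0) = List.replicate (ℓ + 1) 0 := by
      rw [hb.2]
      simp [pvIncB, List.replicate_succ']
    have hlen : (pvCatS ℓ (k + 1)).length = 26 ^ ℓ + (pvCatS (ℓ + 1) k).length := by
      simp [pvCatS, pvLen_Wd]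
    constructor
    · rw [hlen, pvSeq_add, hb1, hb2, (ih (ℓ + 1)).1]
      rfl
    · rw [hlen, Nat.add_comm, Function.iterate_add_apply, hb2, (ih (ℓ + 1)).2,
        show ℓ + 1 + k = ℓ + (k + 1) from by omega]


theorem pvCatS_render (ℓ k : Nat) : (pvCatS ℓ k).map pvRender = pvCatStr ℓ k := by
  induction k generalizing ℓ with
  | zero => rfl
  | succ k ih =>
    simp [pvCatS, pvCatStr, List.map_map, ih, Function.comp, pvRender]


theorem pvCatS_len_ge (k ℓ : Nat) (h : 1 ≤ ℓ) : 26 * k ≤ (pvCatS ℓ k).length := by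
  induction k generalizing ℓ with
  | zero => simp [pvCatS]
  | succ k ih =>
    have h1 : 26 ≤ 26 ^ ℓ := by
      calc 26 = 26 ^ 1 := by norm_num
      _ ≤ 26 ^ ℓ := Nat.pow_le_pow_right (by norm_num) h
    have h2 := ih (ℓ + 1) (by omega)
    simp only [pvCatS, List.length_append, List.length_map, pvLen_Wd]
    omega


theorem pvGoodB_eq (s : String) : (!PySem.Set.contains pvReserved s) = pvGood s := by
  simp only [pvReserved, pvGood, PySem.Set.contains, PySem.Set.ofList, bne]
  by_cases h1 : s = "magic_val" <;> by_cases h2 : s = "nl" <;> by_cases h3 : s = "fp" <;>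
    simp [h1, h2, h3]


theorem pvLoopA_spec (fuel : Nat) (n : Int) (ℓ : Nat) (acc : List String)
    (h : n.toNat ≤ ((pvCatStr ℓ fuel).filter pvGood).length) :
    pvLoopA fuel n ℓ acc = acc ++ ((pvCatStr ℓ fuel).filter pvGood).take n.toNat := by
  induction fuel generalizing n ℓ acc with
  | zero =>
    have hn0 : n.toNat = 0 := by
      simpa [pvCatStr] using h
    have hn : n ≤ 0 := by omega
    simp only [pvLoopA, if_pos hn]
    simp [hn0]
  | succ f ih =>
    by_cases hn : n ≤ 0
    · have hn0 : n.toNat = 0 := by omega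
      simp only [pvLoopA, if_pos hn]
      simp [hn0]
    · simp only [pvLoopA, if_neg hn]
      set nc := ((pvProd ℓ).map (fun x => String.ofList x)).filter pvGood with hnc
      have hblock : nc = ((pvWd ℓ).map (fun w => String.ofList (w.map pvCh))).filter pvGood := by
        rw [hnc, pvProd_eq_Wd, List.map_map]
        rfl
      have hcat : (pvCatStr ℓ (f + 1)).filter pvGood = nc ++ (pvCatStr (ℓ + 1) f).filter pvGood := by
        rw [show pvCatStr ℓ (f + 1) =
            (pvWd ℓ).map (fun w => String.ofList (w.map pvCh)) ++ pvCatStr (ℓ + 1) f from rfl,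
          List.filter_append, hblock]
      have hslice : PySem.List.slice nc none (some (min n (nc.length : Int))) = nc.take n.toNat := by
        rw [PySem.List.slice_to nc (by omega : (0 : Int) ≤ min n (nc.length : Int))]
        by_cases hcn : (nc.length : Int) ≤ n
        · rw [min_comm, min_eq_left hcn]
          rw [List.take_of_length_le (by omega), List.take_of_length_le (by omega)]
        · rw [min_eq_left (by omega)]
      have hlen : n.toNat ≤ nc.length + ((pvCatStr (ℓ + 1) f).filter pvGood).length := by
        have := h
        rw [hcat, List.length_append] at this
        omega
      have harith : (n - (nc.length : Int)).toNat = n.toNat - nc.length := by omega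
      rw [hslice, ih (n - (nc.length : Int)) (ℓ + 1) (acc ++ nc.take n.toNat)
        (by rw [hcat, List.length_append] at h; omega), hcat,
        List.take_append, List.append_assoc, harith]


theorem pvLoopB_spec (fuel : Nat) (n : Int) (s : List Int) (acc : List String)
    (h : n.toNat - acc.length ≤ (((pvSeq (pvIncB s) fuel).map pvRender).filter pvGood).length) :
    pvLoopB fuel n s acc =
      acc ++ (((pvSeq (pvIncB s) fuel).map pvRender).filter pvGood).take (n.toNat - acc.length) := by
  induction fuel generalizing s acc with
  | zero =>
    have h0 : n.toNat - acc.length = 0 := by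
      simpa [pvSeq] using h
    by_cases hlt : (acc.length : Int) < n
    · exfalso
      omega
    · simp only [pvLoopB, if_neg hlt]
      simp [h0]
  | succ f ih =>
    by_cases hlt : (acc.length : Int) < n
    · simp only [pvLoopB, if_pos hlt]
      have hseq : pvSeq (pvIncB s) (f + 1) = pvIncB s :: pvSeq (pvIncB (pvIncB s)) f := rfl
      set w := String.ofList ((pvIncB s).reverse.map pvCh) with hw
      have hwr : pvRender (pvIncB s) = w := rfl
      have hcont : PySem.Set.contains pvReserved w = !pvGood w := by
        rw [← pvGoodB_eq w, Bool.not_not]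
      have hfil : (((pvSeq (pvIncB s) (f + 1)).map pvRender).filter pvGood) =
          (if pvGood w then [w] else []) ++ ((pvSeq (pvIncB (pvIncB s)) f).map pvRender).filter pvGood := by
        rw [hseq, List.map_cons, hwr, List.filter_cons]
        by_cases hg : pvGood w <;> simp [hg]
      by_cases hg : pvGood w
      · rw [hcont, hg]
        simp only [Bool.not_true, Bool.false_eq_true, if_false]
        rw [hfil, if_pos hg] at h ⊢
        have hk : n.toNat - acc.length = (n.toNat - (acc.length + 1)) + 1 := by omega
        rw [hk, List.singleton_append, List.take_succ_cons,
          ih (pvIncB s) (acc ++ [w]) (by simp only [List.length_append, List.length_cons] at h ⊢; omega)]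
        simp [List.append_assoc]
      · rw [hcont, eq_false_of_ne_true hg]
        simp only [Bool.not_false, if_true]
        rw [hfil, if_neg hg, List.nil_append] at h ⊢
        exact ih (pvIncB s) acc h
    · have h0 : n.toNat - acc.length = 0 := by omega
      simp only [pvLoopB, if_neg hlt]
      simp [h0]


theorem pvWd_len_mem : ∀ {ℓ : Nat} {w : List Int}, w ∈ pvWd ℓ → w.length = ℓ := by
  intro ℓ
  induction ℓ with
  | zero =>
    intro w hw
    simp [pvWd] at hw
    simp [hw]
  | succ k ih =>
    intro w hw
    simp only [pvWd, List.mem_flatMap, List.mem_map] at hw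
    obtain ⟨d, _, w', hw', rfl⟩ := hw
    simp [ih hw']

theorem pvWd_digit_mem : ∀ {ℓ : Nat} {w : List Int}, w ∈ pvWd ℓ → ∀ d ∈ w, d ∈ pvDigits := by
  intro ℓ
  induction ℓ with
  | zero =>
    intro w hw
    simp [pvWd] at hw
    simp [hw]
  | succ k ih =>
    intro w hw d hd
    simp only [pvWd, List.mem_flatMap, List.mem_map] at hw
    obtain ⟨d', hd', w', hw', rfl⟩ := hw
    rcases List.mem_cons.mp hd with h | h
    · exact h ▸ hd'
    · exact ih hw' d h

theorem pvNodup_flatMap_cons (ds : List Int) (ws : List (List Int)) (hds : ds.Nodup)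
    (hws : ws.Nodup) : (ds.flatMap (fun d => ws.map (fun w => d :: w))).Nodup := by
  induction ds with
  | nil => simp
  | cons d ds ih =>
    rw [List.flatMap_cons]
    refine List.Nodup.append (hws.map (fun a b h => by injection h)) (ih hds.of_cons) ?_
    intro x hx1 hx2
    simp only [List.mem_map] at hx1
    obtain ⟨w, _, rfl⟩ := hx1
    simp only [List.mem_flatMap, List.mem_map] at hx2
    obtain ⟨d', hd', w', _, heq⟩ := hx2
    have : d' = d := by injection heq
    exact (List.nodup_cons.mp hds).1 (this ▸ hd')

theorem pvNodup_Wd (ℓ : Nat) : (pvWd ℓ).Nodup := by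
  induction ℓ with
  | zero => simp [pvWd]
  | succ k ih => exact pvNodup_flatMap_cons pvDigits (pvWd k) (by decide) ih

theorem pvMapCh_inj : ∀ (x y : List Int), (∀ d ∈ x, d ∈ pvDigits) → (∀ d ∈ y, d ∈ pvDigits) →
    x.map pvCh = y.map pvCh → x = y := by
  intro x
  induction x with
  | nil =>
    intro y _ _ h
    cases y with
    | nil => rfl
    | cons b ys => simp at h
  | cons a xs ih =>
    intro y hx hy h
    cases y with
    | nil => simp at h
    | cons b ys =>
      simp only [List.map_cons, List.cons.injEq] at h
      have hab : a = b :=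
        List.inj_on_of_nodup_map (l := pvDigits) (f := pvCh) (by decide)
          (hx a (by simp)) (hy b (by simp)) h.1
      rw [hab, ih ys (fun d hd => hx d (by simp [hd])) (fun d hd => hy d (by simp [hd])) h.2]

theorem pvNodup_block (ℓ : Nat) :
    ((pvWd ℓ).map (fun w => String.ofList (w.map pvCh))).Nodup := by
  refine (pvNodup_Wd ℓ).map_on ?_
  intro x hx y hy hxy
  have h : x.map pvCh = y.map pvCh := by
    have := congrArg String.toList hxy
    simpa using this
  exact pvMapCh_inj x y (pvWd_digit_mem hx) (pvWd_digit_mem hy) h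

theorem pvCatStr_len_lb : ∀ (k ℓ : Nat) (s : String), s ∈ pvCatStr ℓ k → ℓ ≤ s.toList.length := by
  intro k
  induction k with
  | zero =>
    intro ℓ s hs
    simp [pvCatStr] at hs
  | succ k ih =>
    intro ℓ s hs
    rcases List.mem_append.mp hs with h | h
    · simp only [List.mem_map] at h
      obtain ⟨w, hw, rfl⟩ := h
      simp [pvWd_len_mem hw]
    · exact Nat.le_of_succ_le (ih (ℓ + 1) s h)

theorem pvNodup_catStr (ℓ k : Nat) : (pvCatStr ℓ k).Nodup := by
  induction k generalizing ℓ with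
  | zero => simp [pvCatStr]
  | succ k ih =>
    refine List.Nodup.append (pvNodup_block ℓ) (ih (ℓ + 1)) ?_
    intro s hs1 hs2
    simp only [List.mem_map] at hs1
    obtain ⟨w, hw, rfl⟩ := hs1
    have h1 : (String.ofList (w.map pvCh)).toList.length = ℓ := by
      simp [pvWd_len_mem hw]
    have h2 := pvCatStr_len_lb k (ℓ + 1) _ hs2
    omega


theorem pvFilter_take_len (N : Nat) (hN : 1 ≤ N) :
    N ≤ (((pvCatStr 1 N).take (N + 3)).filter pvGood).length := by
  set P := (pvCatStr 1 N).take (N + 3) with hP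
  have hlenS : 26 * N ≤ (pvCatStr 1 N).length := by
    have := pvCatS_len_ge N 1 (by omega)
    calc 26 * N ≤ (pvCatS 1 N).length := this
    _ = ((pvCatS 1 N).map pvRender).length := by simp
    _ = (pvCatStr 1 N).length := by rw [pvCatS_render]
  have hlenP : P.length = N + 3 := by
    rw [hP, List.length_take]
    omega
  have hndP : P.Nodup := (pvNodup_catStr 1 N).sublist (List.take_sublist _ _)
  have hsub : P.filter (fun s => !pvGood s) ⊆ ["magic_val", "nl", "fp"] := by
    intro s hs
    rw [List.mem_filter] at hs
    have := hs.2
    simp only [pvGood, Bool.not_and, Bool.or_eq_true, Bool.not_eq_true', bne_eq_false_iff_eq] at this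
    rcases this with (h | h) | h <;> simp [h]
  have hbad : (P.filter (fun s => !pvGood s)).length ≤ 3 :=
    ((hndP.filter _).subperm hsub).length_le
  have hsum : P.length = (P.filter pvGood).length + (P.filter (fun s => !pvGood s)).length :=
    List.length_eq_length_filter_add _
  omega


-- ===== VERDICT (by name: the statement is the Claim_ definition above) =====
theorem generate_constant_set_spec : Claim_equal_generate_constant_set := by
  intro n _
  unfold Spec_generate_constant_set generate_constant_set generate_constant_set_alt
  by_cases hn : n ≤ 0
  · rw [pvLoopA.eq_def, if_pos hn, pvLoopB.eq_def,
      if_neg (by simpa using hn : ¬ ((([] : List String).length : Int) < n))]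
  · set N := n.toNat with hN
    have hN1 : 1 ≤ N := by omega
    have hK : N + 3 ≤ (pvCatS 1 N).length := by
      have := pvCatS_len_ge N 1 (by omega)
      omega
    have hB0 : pvIncB [] = List.replicate 1 0 := rfl
    have hBseq : (pvSeq (pvIncB []) (N + 3)).map pvRender = (pvCatStr 1 N).take (N + 3) := by
      rw [hB0, pvSeq_take _ _ _ hK, (pvChain N 1).1, List.map_take, pvCatS_render]
    have hFT := pvFilter_take_len N hN1
    have hHB : N - ([] : List String).length ≤
        (((pvSeq (pvIncB []) (N + 3)).map pvRender).filter pvGood).length := by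
      rw [hBseq]
      simpa using hFT
    have hS : pvCatStr 1 N = (pvCatStr 1 N).take (N + 3) ++ (pvCatStr 1 N).drop (N + 3) :=
      (List.take_append_drop _ _).symm
    have hHA : n.toNat ≤ ((pvCatStr 1 N).filter pvGood).length := by
      conv_rhs => rw [hS]
      rw [List.filter_append, List.length_append]
      omega
    rw [pvLoopA_spec N n 1 [] hHA, pvLoopB_spec (N + 3) n [] [] hHB]
    simp only [List.nil_append, List.length_nil, Nat.sub_zero]
    rw [hBseq]
    conv_lhs => rw [hS]
    rw [List.filter_append, List.take_append,
      Nat.sub_eq_zero_of_le hFT, List.take_zero, List.append_nil]
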